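-- pv_equiv track=rewrite | github.com/Emillhf/Construction_of_a_Self-Interpreter | Compilers/3_tape_to_1_tape.py | groupByTape3
-- ===== SOURCE A (Python) =====
-- def inner_list(rules,tape):
--     tape_dict = {}
--     for rule in rules:
--         tape_elm = rule[tape]
--         if tape_elm in tape_dict.keys():
--             tape_dict[tape_elm].append(rule)
--         else:
--             tape_dict[tape_elm] = [rule]
--     return list(tape_dict.values())
--
-- def groupByTape3(state_rules):
--     final = []
--     for grouped_rules in state_rules:
--         temp1 = []
--         for grouped_by_tape_1 in grouped_rules:
--             temp2 = []
--             for rules in grouped_by_tape_1: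
--                 temp2.append(inner_list(rules,3))
--             temp1.append(temp2)
--         final.append(temp1)
--     return final
-- ===== SOURCE B (Python) =====
-- def _keys_in_order(rules, tape):
--     keys = []
--     for rule in rules:
--         k = rule[tape]
--         if k not in keys:
--             keys.append(k)
--     return keys
--
-- def groupByTape3(state_rules):
--     return [[[[ [r for r in rules if r[3] == k]
--                 for k in _keys_in_order(rules, 3)]
--                for rules in grouped_by_tape_1]
--               for grouped_by_tape_1 in grouped_rules]
--              for grouped_rules in state_rules]
-- ===== Notes on version B (the rewrite author's own statement) =====
-- stated objective: alternative
-- what changed: The inner grouping helper no longer accumulates a dict in one pass: it first collects the distinct tape-3 keys in first-appearance order, then builds each group by filtering the rule list per key; the outer three-level traversal stays.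
import Mathlib
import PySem

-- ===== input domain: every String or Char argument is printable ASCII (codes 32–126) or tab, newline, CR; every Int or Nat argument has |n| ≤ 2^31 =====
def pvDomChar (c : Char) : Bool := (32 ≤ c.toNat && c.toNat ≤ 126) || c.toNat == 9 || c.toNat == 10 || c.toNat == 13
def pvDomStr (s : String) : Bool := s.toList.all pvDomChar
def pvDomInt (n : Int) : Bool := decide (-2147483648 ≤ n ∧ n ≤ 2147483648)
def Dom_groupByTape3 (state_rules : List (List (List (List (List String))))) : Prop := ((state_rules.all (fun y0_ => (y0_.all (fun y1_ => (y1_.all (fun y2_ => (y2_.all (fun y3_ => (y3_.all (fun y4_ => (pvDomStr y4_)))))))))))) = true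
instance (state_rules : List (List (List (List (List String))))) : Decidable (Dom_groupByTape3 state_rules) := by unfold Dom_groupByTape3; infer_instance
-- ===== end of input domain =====

-- B replaces the one-pass dict accumulation in the inner grouping helper by an ordered
-- distinct-key pass followed by one filter per key (alternative decomposition, same output).

-- ===== PORT A =====
-- inner_list(rules, tape): dict keyed by rule[tape], appending; rule[tape] is total here
-- via pyGetD (Pre_ excludes rules shorter than 4, where Python raises IndexError).
def innerList (rules : List (List String)) (tape : Int) : List (List (List String)) :=
  (rules.foldl (fun d rule =>
      let tape_elm := PySem.List.pyGetD rule tape ""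
      if d.contains tape_elm then d.modify tape_elm [] (fun v => v ++ [rule])
      else d.insert tape_elm [rule])
    PySem.Dict.empty).values

def groupByTape3 (state_rules : List (List (List (List (List String))))) : List (List (List (List (List (List String))))) :=
  state_rules.foldl (fun final grouped_rules =>
    final ++ [grouped_rules.foldl (fun temp1 grouped_by_tape_1 =>
      temp1 ++ [grouped_by_tape_1.foldl (fun temp2 rules =>
        temp2 ++ [innerList rules 3]) []]) []]) []

-- ===== PORT B =====
def keysInOrder (rules : List (List String)) (tape : Int) : List String :=
  rules.foldl (fun keys rule => PySem.Set.add keys (PySem.List.pyGetD rule tape "")) PySem.Set.empty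

def groupByTape3_alt (state_rules : List (List (List (List (List String))))) : List (List (List (List (List (List String))))) :=
  state_rules.map (fun grouped_rules =>
    grouped_rules.map (fun grouped_by_tape_1 =>
      grouped_by_tape_1.map (fun rules =>
        (keysInOrder rules 3).map (fun k =>
          rules.filter (fun r => PySem.List.pyGetD r 3 "" == k)))))

-- ===== PRECONDITION & SPEC =====
-- Pre_ excludes exactly the inputs on which Python A raises IndexError: a rule (innermost
-- string list) with fewer than 4 entries, where rule[3] fails.
def Pre_groupByTape3 (state_rules : List (List (List (List (List String))))) : Prop :=
  (state_rules.all (fun gr => gr.all (fun g1 => g1.all (fun rules => rules.all (fun r => decide (4 ≤ r.length)))))) = true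
instance (state_rules : List (List (List (List (List String))))) : Decidable (Pre_groupByTape3 state_rules) := by unfold Pre_groupByTape3; infer_instance
def pvWitness_groupByTape3 : List (List (List (List (List String)))) :=
  [[[[["q0", "a", "b", "c"], ["q0", "a", "b", "d"], ["q1", "x", "y", "c"]]]]]

def Spec_groupByTape3 (state_rules : List (List (List (List (List String))))) (out : List (List (List (List (List (List String)))))) : Prop := out = groupByTape3_alt state_rules
instance (state_rules : List (List (List (List (List String))))) (out : List (List (List (List (List (List String)))))) : Decidable (Spec_groupByTape3 state_rules out) := by unfold Spec_groupByTape3; infer_instance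

-- ===== CLAIM (what is proved, stated in full; the proofs are below) =====
def Claim_equal_groupByTape3 : Prop := ∀ (state_rules : List (List (List (List (List String))))), Dom_groupByTape3 state_rules → Pre_groupByTape3 state_rules → Spec_groupByTape3 state_rules (groupByTape3 state_rules)

-- ===== LEMMAS AND PROOFS =====

-- A's branchy dict step is exactly Dict.modify (modify appends a fresh key with f dflt).
theorem innerList_step (d : PySem.Dict String (List (List String))) (k : String) (r : List String) :
    (if d.contains k then d.modify k [] (fun v => v ++ [r]) else d.insert k [r])
      = d.modify k [] (fun v => v ++ [r]) := by
  by_cases h : d.contains k = true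
  · simp [h]
  · simp only [Bool.not_eq_true] at h
    simp [h, PySem.Dict.modify, PySem.Dict.getD_of_not_contains d [] h]

theorem innerList_eq (rules : List (List String)) (tape : Int) :
    innerList rules tape
      = (keysInOrder rules tape).map (fun k => rules.filter (fun r => PySem.List.pyGetD r tape "" == k)) := by
  unfold innerList keysInOrder
  have hstep :
      (fun (d : PySem.Dict String (List (List String))) (rule : List String) =>
        let tape_elm := PySem.List.pyGetD rule tape ""
        if d.contains tape_elm then d.modify tape_elm [] (fun v => v ++ [rule])
        else d.insert tape_elm [rule])
      = fun d rule => d.modify (PySem.List.pyGetD rule tape "") [] (fun v => v ++ [rule]) := by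
    funext d rule
    exact innerList_step d (PySem.List.pyGetD rule tape "") rule
  rw [hstep]
  set key : List String → String := fun r => PySem.List.pyGetD r tape "" with hkey
  set d := rules.foldl (fun d rule => d.modify (key rule) [] (fun v => v ++ [rule])) PySem.Dict.empty with hd
  have hkeys : d.keys = PySem.Set.ofList (rules.map key) := by
    rw [hd, PySem.Dict.keys_foldl_modify_key rules key [] (fun _ x => fun v => v ++ [x])]
    simp [PySem.Set.update, PySem.Set.ofList, PySem.Dict.keys_empty]
  have hnodup : d.keys.Nodup := by
    rw [hd]
    exact PySem.Dict.nodup_keys_foldl_modify_key rules key [] (fun _ x => fun v => v ++ [x]) _ PySem.Dict.nodup_keys_empty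
  have hks : rules.foldl (fun keys rule => PySem.Set.add keys (key rule)) PySem.Set.empty
      = PySem.Set.ofList (rules.map key) := by
    rw [PySem.Set.ofList, List.foldl_map]
  have hgetD : ∀ k : String, d.getD k [] = rules.filter (fun r => key r == k) := by
    intro k
    have hpairs : d = (rules.map (fun r => (key r, r))).foldl
        (fun d p => d.modify p.1 [] (fun v => v ++ [p.2])) PySem.Dict.empty := by
      rw [hd, List.foldl_map]
    rw [hpairs, PySem.Dict.getD_foldl_modify_append]
    simp [List.filter_map, Function.comp_def]
  rw [PySem.Dict.values_eq_map_keys d hnodup [], hkeys, hks]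
  exact List.map_congr_left (fun k _ => hgetD k)

-- ===== VERDICT (by name: the statement is the Claim_ definition above) =====
theorem groupByTape3_spec : Claim_equal_groupByTape3 := by
  intro state_rules _ _
  unfold Spec_groupByTape3 groupByTape3 groupByTape3_alt
  rw [PySem.List.foldl_append_singleton_eq_map]
  simp only [List.nil_append]
  refine List.map_congr_left (fun gr _ => ?_)
  rw [PySem.List.foldl_append_singleton_eq_map]
  simp only [List.nil_append]
  refine List.map_congr_left (fun g1 _ => ?_)
  rw [PySem.List.foldl_append_singleton_eq_map]
  simp only [List.nil_append]
  exact List.map_congr_left (fun rules _ => innerList_eq rules 3)
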